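-- pv_equiv track=rewrite | github.com/lexsightllc/lousa-assurance | src/lousa/epistemic.py | check_G_implies_F
-- ===== SOURCE A (Python) =====
-- from typing import Dict, Set, List
--
-- def check_G_implies_F(graph: Dict[str, List[str]], label: Dict[str, Set[str]], p: str, q: str) -> bool:
--     from collections import deque
--     for node in graph:
--         if p in label.get(node, set()):
--             visited = set([node])
--             dq = deque([node])
--             reachable_q = False
--             while dq:
--                 u = dq.popleft()
--                 if q in label.get(u, set()):
--                     reachable_q = True
--                     break
--                 for v in graph.get(u, []):
--                     if v not in visited:
--                         visited.add(v)
--                         dq.append(v)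
--             if not reachable_q:
--                 return False
--     return True
-- ===== SOURCE B (Python) =====
-- def check_G_implies_F(graph, label, p, q):
--     # One backward multi-source search from all q-labeled nodes over the
--     # reversed graph, instead of one forward BFS per p-labeled node.
--     edges = [(v, u) for u, vs in graph.items() for v in vs]
--     rev = {}
--     for v, u in edges:
--         rev.setdefault(v, []).append(u)
--     stack = [n for n in label if q in label[n]]
--     good = set(stack)
--     while stack:
--         v = stack.pop()
--         for u in rev.get(v, []):
--             if u not in good:
--                 good.add(u)
--                 stack.append(u)
--     return all(n in good for n in graph if p in label.get(n, set()))
-- ===== Notes on version B (the rewrite author's own statement) =====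
-- stated objective: alternative
-- what changed: Instead of running a fresh forward BFS from every p-labeled node, B builds the reversed graph once and does a single multi-source backward search from all q-labeled nodes, then checks each p-labeled node is in the reached set.
import Mathlib
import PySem

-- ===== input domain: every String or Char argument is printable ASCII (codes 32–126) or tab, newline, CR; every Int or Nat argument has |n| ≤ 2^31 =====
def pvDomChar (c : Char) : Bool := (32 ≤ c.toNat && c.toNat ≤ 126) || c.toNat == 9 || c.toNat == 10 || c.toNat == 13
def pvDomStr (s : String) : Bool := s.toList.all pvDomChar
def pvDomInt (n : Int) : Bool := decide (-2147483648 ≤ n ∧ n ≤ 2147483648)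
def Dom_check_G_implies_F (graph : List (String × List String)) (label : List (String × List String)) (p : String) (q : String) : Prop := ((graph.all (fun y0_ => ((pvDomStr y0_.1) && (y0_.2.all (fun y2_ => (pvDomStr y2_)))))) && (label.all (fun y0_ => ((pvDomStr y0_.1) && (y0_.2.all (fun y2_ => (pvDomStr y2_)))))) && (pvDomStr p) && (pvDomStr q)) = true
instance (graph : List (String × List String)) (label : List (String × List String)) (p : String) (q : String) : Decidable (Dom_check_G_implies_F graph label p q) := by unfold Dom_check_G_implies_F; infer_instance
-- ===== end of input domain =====

-- B replaces A's per-p-node forward BFS by one backward multi-source search from the q-labeled nodes over the reversed graph (a single traversal instead of one per p-node).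


-- ===== PORT A =====
-- A's inner  "for v in graph.get(u, []): if v not in visited: visited.add(v); dq.append(v)"
def pvEnq (succs : List String) (visited : PySem.Set String) (dq : List String) :
    PySem.Set String × List String :=
  match succs with
  | [] => (visited, dq)
  | v :: vs =>
    if PySem.Set.contains visited v then pvEnq vs visited dq
    else pvEnq vs (PySem.Set.add visited v) (dq ++ [v])

-- A's  "while dq: u = dq.popleft(); …"  (fuel bounds the number of pops; it never runs out, see bfsA_complete)
def pvBfsA (G L : PySem.Dict String (List String)) (q : String) :
    Nat → List String → PySem.Set String → Bool
  | 0, _, _ => false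
  | fuel + 1, dq, visited =>
    match dq with
    | [] => false
    | u :: rest =>
      if (PySem.Dict.getD L u []).contains q then true
      else
        let s := pvEnq (PySem.Dict.getD G u []) visited rest
        pvBfsA G L q fuel s.2 s.1

-- A's outer  "for node in graph: …"
def pvOuterA (G L : PySem.Dict String (List String)) (p q : String) : List String → Bool
  | [] => true
  | node :: rest =>
    if (PySem.Dict.getD L node []).contains p then
      if pvBfsA G L q ((G.values.flatten).length + 1) [node] (PySem.Set.ofList [node]) then
        pvOuterA G L p q rest
      else false
    else pvOuterA G L p q rest

def check_G_implies_F (graph : List (String × List String)) (label : List (String × List String)) (p : String) (q : String) : Bool :=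
  let G := PySem.Dict.ofList graph
  let L := PySem.Dict.ofList label
  pvOuterA G L p q G.keys

-- ===== PORT B =====
-- B's  "for u in rev.get(v, []): if u not in good: good.add(u); stack.append(u)"
-- (the Lean worklist keeps its top at the head: Python's stack.pop()/append become head-match/cons)
def pvGrow (preds : List String) (good : PySem.Set String) (stack : List String) :
    PySem.Set String × List String :=
  match preds with
  | [] => (good, stack)
  | u :: us =>
    if PySem.Set.contains good u then pvGrow us good stack
    else pvGrow us (PySem.Set.add good u) (u :: stack)

-- B's  "while stack: v = stack.pop(); …"  (fuel bounds the number of pops; it never runs out, see reach_complete)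
def pvReach (rev : PySem.Dict String (List String)) :
    Nat → List String → PySem.Set String → PySem.Set String
  | 0, _, good => good
  | fuel + 1, stack, good =>
    match stack with
    | [] => good
    | v :: rest =>
      let s := pvGrow (PySem.Dict.getD rev v []) good rest
      pvReach rev fuel s.2 s.1

def check_G_implies_F_alt (graph : List (String × List String)) (label : List (String × List String)) (p : String) (q : String) : Bool :=
  let G := PySem.Dict.ofList graph
  let L := PySem.Dict.ofList label
  let edges := G.items.flatMap (fun uv => uv.2.map (fun v => (v, uv.1)))
  let rev := edges.foldl (fun d pr => d.modify pr.1 [] (· ++ [pr.2])) PySem.Dict.empty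
  let stack0 := L.keys.filter (fun n => (PySem.Dict.getD L n []).contains q)
  let good := pvReach rev (G.size + L.size) stack0 (PySem.Set.ofList stack0)
  G.keys.all (fun n => !(PySem.Dict.getD L n []).contains p || PySem.Set.contains good n)

-- ===== PRECONDITION & SPEC =====
def Spec_check_G_implies_F (graph : List (String × List String)) (label : List (String × List String)) (p : String) (q : String) (out : Bool) : Prop := out = check_G_implies_F_alt graph label p q
instance (graph : List (String × List String)) (label : List (String × List String)) (p : String) (q : String) (out : Bool) : Decidable (Spec_check_G_implies_F graph label p q out) := by unfold Spec_check_G_implies_F; infer_instance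

-- ===== CLAIM (what is proved, stated in full; the proofs are below) =====
def Claim_equal_check_G_implies_F : Prop := ∀ (graph : List (String × List String)) (label : List (String × List String)) (p : String) (q : String), Dom_check_G_implies_F graph label p q → Spec_check_G_implies_F graph label p q (check_G_implies_F graph label p q)



-- ===== LEMMAS AND PROOFS =====

-- the edge relation of the (effective) graph dict and "can reach a q-labeled node"
def EdgeG (G : PySem.Dict String (List String)) (u v : String) : Prop :=
  v ∈ PySem.Dict.getD G u []

def ReachQ (G L : PySem.Dict String (List String)) (q : String) (x : String) : Prop :=
  ∃ t, Relation.ReflTransGen (EdgeG G) x t ∧ q ∈ PySem.Dict.getD L t []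

-- proof-side names for the two values B builds once (definitionally the port's subterms)
def pvRevOf (G : PySem.Dict String (List String)) : PySem.Dict String (List String) :=
  (G.items.flatMap (fun uv => uv.2.map (fun v => (v, uv.1)))).foldl
    (fun d pr => d.modify pr.1 [] (· ++ [pr.2])) PySem.Dict.empty

def pvStack0 (L : PySem.Dict String (List String)) (q : String) : List String :=
  L.keys.filter (fun n => (PySem.Dict.getD L n []).contains q)

theorem pvEdge_mem_keys (G : PySem.Dict String (List String)) (u v : String)
    (h : v ∈ PySem.Dict.getD G u []) : u ∈ G.keys := by
  by_cases hc : G.contains u = true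
  · exact (PySem.Dict.contains_iff_mem_keys G u).mp hc
  · rw [PySem.Dict.getD_of_not_contains G [] (Bool.eq_false_iff.mpr hc)] at h
    cases h

theorem pvMem_values_flatten (G : PySem.Dict String (List String)) (hnd : G.keys.Nodup)
    (u v : String) (h : v ∈ PySem.Dict.getD G u []) : v ∈ G.values.flatten := by
  have hk : u ∈ G.keys := pvEdge_mem_keys G u v h
  have hv : PySem.Dict.getD G u [] ∈ G.values := by
    rw [PySem.Dict.values_eq_map_keys G hnd []]
    exact List.mem_map.mpr ⟨u, hk, rfl⟩
  exact List.mem_flatten.mpr ⟨_, hv, h⟩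

theorem pvCard_step (U visited nw : List String) (hnd : nw.Nodup)
    (hU : ∀ x ∈ nw, x ∈ U) (hdis : ∀ x ∈ nw, x ∉ visited) :
    (U.toFinset \ (visited ++ nw).toFinset).card + nw.length
        = (U.toFinset \ visited.toFinset).card ∧
      nw.length ≤ (U.toFinset \ visited.toFinset).card := by
  have hC : nw.toFinset ⊆ U.toFinset \ visited.toFinset := by
    intro x hx
    rw [List.mem_toFinset] at hx
    exact Finset.mem_sdiff.mpr ⟨List.mem_toFinset.mpr (hU x hx),
      fun hv => hdis x hx (List.mem_toFinset.mp hv)⟩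
  have h1 : U.toFinset \ (visited ++ nw).toFinset
      = (U.toFinset \ visited.toFinset) \ nw.toFinset := by
    ext x; simp; tauto
  have hcard : ((U.toFinset \ visited.toFinset) \ nw.toFinset).card
      = (U.toFinset \ visited.toFinset).card - nw.toFinset.card := by
    rw [Finset.card_sdiff, Finset.inter_eq_left.mpr hC]
  have hlen : nw.toFinset.card = nw.length := List.toFinset_card_of_nodup hnd
  have hle := Finset.card_le_card hC
  constructor
  · rw [h1, hcard]; omega
  · omega

theorem pvEnq_spec (succs : List String) (visited : PySem.Set String) (dq : List String) :
    ∃ nw : List String,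
      pvEnq succs visited dq = (visited ++ nw, dq ++ nw) ∧ nw.Nodup ∧
      (∀ x ∈ nw, x ∈ succs ∧ x ∉ visited) ∧ (∀ x ∈ succs, x ∈ visited ∨ x ∈ nw) := by
  induction succs generalizing visited dq with
  | nil => exact ⟨[], by simp [pvEnq], by simp, by simp, by simp⟩
  | cons v vs ih =>
    have hcons : pvEnq (v :: vs) visited dq
        = if PySem.Set.contains visited v = true then pvEnq vs visited dq
          else pvEnq vs (PySem.Set.add visited v) (dq ++ [v]) := rfl
    by_cases h : v ∈ visited
    · have hc : PySem.Set.contains visited v = true := (PySem.Set.contains_iff _ _).mpr h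
      obtain ⟨nw, heq, hnd, hmem, hcov⟩ := ih visited dq
      refine ⟨nw, ?_, hnd, ?_, ?_⟩
      · rw [hcons, if_pos hc]; exact heq
      · exact fun x hx => ⟨List.mem_cons_of_mem _ (hmem x hx).1, (hmem x hx).2⟩
      · intro x hx
        rcases List.mem_cons.mp hx with rfl | hx'
        · exact Or.inl h
        · exact hcov x hx'
    · have hc : ¬ PySem.Set.contains visited v = true :=
        fun h' => h ((PySem.Set.contains_iff _ _).mp h')
      have hadd : PySem.Set.add visited v = visited ++ [v] := PySem.Set.add_of_not_mem h
      obtain ⟨nw, heq, hnd, hmem, hcov⟩ := ih (PySem.Set.add visited v) (dq ++ [v])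
      refine ⟨v :: nw, ?_, ?_, ?_, ?_⟩
      · rw [hcons, if_neg hc, heq, hadd]
        simp
      · refine List.nodup_cons.mpr ⟨fun hv => ?_, hnd⟩
        exact (hmem v hv).2 (by rw [hadd]; simp)
      · intro x hx
        rcases List.mem_cons.mp hx with rfl | hx'
        · exact ⟨List.mem_cons_self .., h⟩
        · refine ⟨List.mem_cons_of_mem _ (hmem x hx').1, fun hxv => ?_⟩
          exact (hmem x hx').2 (by rw [hadd]; exact List.mem_append_left _ hxv)
      · intro x hx
        rcases List.mem_cons.mp hx with rfl | hx'
        · exact Or.inr (List.mem_cons_self ..)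
        · rcases hcov x hx' with hv | hnw
          · rw [hadd] at hv
            rcases List.mem_append.mp hv with hv | hv
            · exact Or.inl hv
            · simp at hv; subst hv; exact Or.inr (List.mem_cons_self ..)
          · exact Or.inr (List.mem_cons_of_mem _ hnw)

theorem bfsA_sound (G L : PySem.Dict String (List String)) (q s : String) :
    ∀ fuel dq visited, (∀ x ∈ dq, Relation.ReflTransGen (EdgeG G) s x) →
      pvBfsA G L q fuel dq visited = true → ReachQ G L q s := by
  intro fuel
  induction fuel with
  | zero => intro dq visited _ h; simp [pvBfsA] at h
  | succ f ih =>
    intro dq visited hdq h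
    cases dq with
    | nil => simp [pvBfsA] at h
    | cons u rest =>
      simp only [pvBfsA] at h
      by_cases hq : (PySem.Dict.getD L u []).contains q = true
      · exact ⟨u, hdq u (List.mem_cons_self ..), by simpa using hq⟩
      · rw [if_neg hq] at h
        obtain ⟨nw, heq, hnd, hmem, hcov⟩ := pvEnq_spec (PySem.Dict.getD G u []) visited rest
        rw [heq] at h
        refine ih (rest ++ nw) (visited ++ nw) ?_ h
        intro x hx
        rcases List.mem_append.mp hx with hx | hx
        · exact hdq x (List.mem_cons_of_mem _ hx)
        · exact (hdq u (List.mem_cons_self ..)).tail (hmem x hx).1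

theorem pvNoEscape (G L : PySem.Dict String (List String)) (q : String) (visited : List String)
    (hcl : ∀ x ∈ visited, (PySem.Dict.getD L x []).contains q = false ∧
      ∀ v ∈ PySem.Dict.getD G x [], v ∈ visited)
    (x : String) (hx : x ∈ visited) (hr : ReachQ G L q x) : False := by
  obtain ⟨t, hpath, hqt⟩ := hr
  have key : ∀ a, Relation.ReflTransGen (EdgeG G) a t → a ∈ visited → t ∈ visited := by
    intro a h
    induction h using Relation.ReflTransGen.head_induction_on with
    | refl => exact id
    | head hab hbt ih => exact fun ha => ih ((hcl _ ha).2 _ hab)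
  have ht := key x hpath hx
  have h1 := (hcl t ht).1
  have h2 : (PySem.Dict.getD L t []).contains q = true := by simpa using hqt
  rw [h1] at h2
  cases h2

theorem bfsA_complete (G L : PySem.Dict String (List String)) (hnd : G.keys.Nodup) (q s : String) :
    ∀ fuel (dq : List String) (visited : PySem.Set String),
      (∀ x ∈ dq, x ∈ visited) →
      (∀ x ∈ visited, x ∉ dq → (PySem.Dict.getD L x []).contains q = false ∧
        ∀ v ∈ PySem.Dict.getD G x [], v ∈ visited) →
      fuel ≥ dq.length + (((s :: G.values.flatten).toFinset) \ visited.toFinset).card →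
      (∃ x ∈ visited, ReachQ G L q x) →
      pvBfsA G L q fuel dq visited = true := by
  intro fuel
  induction fuel with
  | zero =>
    intro dq visited hsub hcl hfuel hex
    exfalso
    have hdq : dq = [] := by
      cases dq with
      | nil => rfl
      | cons a l => simp [List.length_cons] at hfuel
    subst hdq
    obtain ⟨x, hx, hr⟩ := hex
    exact pvNoEscape G L q visited (fun x hx => hcl x hx (by simp)) x hx hr
  | succ f ih =>
    intro dq visited hsub hcl hfuel hex
    cases dq with
    | nil =>
      exfalso
      obtain ⟨x, hx, hr⟩ := hex
      exact pvNoEscape G L q visited (fun x hx => hcl x hx (by simp)) x hx hr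
    | cons u rest =>
      simp only [pvBfsA]
      by_cases hq : (PySem.Dict.getD L u []).contains q = true
      · rw [if_pos hq]
      · rw [if_neg hq]
        have hq' : (PySem.Dict.getD L u []).contains q = false := Bool.eq_false_iff.mpr hq
        obtain ⟨nw, heq, hndw, hmem, hcov⟩ := pvEnq_spec (PySem.Dict.getD G u []) visited rest
        rw [heq]
        show pvBfsA G L q f (rest ++ nw) (visited ++ nw) = true
        have hnwU : ∀ x ∈ nw, x ∈ s :: G.values.flatten := fun x hx =>
          List.mem_cons_of_mem _ (pvMem_values_flatten G hnd u x (hmem x hx).1)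
        have hcs := pvCard_step (s :: G.values.flatten) visited nw hndw hnwU
          (fun x hx => (hmem x hx).2)
        apply ih
        · intro x hx
          rcases List.mem_append.mp hx with hx | hx
          · exact List.mem_append_left _ (hsub x (List.mem_cons_of_mem _ hx))
          · exact List.mem_append_right _ hx
        · intro x hxv hnx
          rcases List.mem_append.mp hxv with hxv | hxv
          · by_cases hxu : x = u
            · subst hxu
              refine ⟨hq', fun v hv => ?_⟩
              rcases hcov v hv with h' | h'
              · exact List.mem_append_left _ h'
              · exact List.mem_append_right _ h'
            · have hxdq : x ∉ u :: rest := by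
                intro hm
                rcases List.mem_cons.mp hm with rfl | hm'
                · exact hxu rfl
                · exact hnx (List.mem_append_left _ hm')
              obtain ⟨hq2, hsucc⟩ := hcl x hxv hxdq
              exact ⟨hq2, fun v hv => List.mem_append_left _ (hsucc v hv)⟩
          · exact absurd (List.mem_append_right rest hxv) hnx
        · have := hcs.1
          simp only [List.length_append, List.length_cons] at hfuel ⊢
          omega
        · obtain ⟨x, hx, hr⟩ := hex
          exact ⟨x, List.mem_append_left _ hx, hr⟩

theorem bfsA_iff (G L : PySem.Dict String (List String)) (hnd : G.keys.Nodup) (q s : String) :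
    pvBfsA G L q ((G.values.flatten).length + 1) [s] (PySem.Set.ofList [s]) = true ↔
      ReachQ G L q s := by
  have hv : PySem.Set.ofList [s] = [s] := rfl
  rw [hv]
  constructor
  · intro h
    exact bfsA_sound G L q s _ [s] [s]
      (fun x hx => by simp at hx; subst hx; exact Relation.ReflTransGen.refl) h
  · intro hr
    apply bfsA_complete G L hnd q s
    · intro x hx; exact hx
    · intro x hx hnx; exact absurd hx hnx
    · have hsubf : (s :: G.values.flatten).toFinset \ [s].toFinset
          ⊆ (G.values.flatten).toFinset := by
        intro x hx
        simp [List.toFinset_cons] at hx ⊢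
        tauto
      have h1 := Finset.card_le_card hsubf
      have h2 := List.toFinset_card_le (G.values.flatten)
      simp only [List.length_cons, List.length_nil]
      omega
    · exact ⟨s, List.mem_cons_self .., hr⟩

theorem outerA_spec (G L : PySem.Dict String (List String)) (hnd : G.keys.Nodup)
    (p q : String) (ks : List String) :
    pvOuterA G L p q ks = true ↔
      ∀ n ∈ ks, (PySem.Dict.getD L n []).contains p = true → ReachQ G L q n := by
  induction ks with
  | nil => simp [pvOuterA]
  | cons n rest ih =>
    simp only [pvOuterA]
    by_cases hp : (PySem.Dict.getD L n []).contains p = true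
    · rw [if_pos hp]
      by_cases hb : pvBfsA G L q ((G.values.flatten).length + 1) [n] (PySem.Set.ofList [n]) = true
      · rw [if_pos hb, ih]
        constructor
        · intro h x hx hpx
          rcases List.mem_cons.mp hx with rfl | hx'
          · exact (bfsA_iff G L hnd q x).mp hb
          · exact h x hx' hpx
        · intro h x hx hpx
          exact h x (List.mem_cons_of_mem _ hx) hpx
      · rw [if_neg hb]
        constructor
        · intro h; cases h
        · intro h
          exact absurd ((bfsA_iff G L hnd q n).mpr (h n (List.mem_cons_self ..) hp)) hb
    · rw [if_neg hp, ih]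
      constructor
      · intro h x hx hpx
        rcases List.mem_cons.mp hx with rfl | hx'
        · exact absurd hpx hp
        · exact h x hx' hpx
      · intro h x hx hpx
        exact h x (List.mem_cons_of_mem _ hx) hpx

theorem pvGrow_spec (preds : List String) (good : PySem.Set String) (stack : List String) :
    ∃ nw : List String,
      pvGrow preds good stack = (good ++ nw, nw.reverse ++ stack) ∧ nw.Nodup ∧
      (∀ x ∈ nw, x ∈ preds ∧ x ∉ good) ∧ (∀ x ∈ preds, x ∈ good ∨ x ∈ nw) := by
  induction preds generalizing good stack with
  | nil => exact ⟨[], by simp [pvGrow], by simp, by simp, by simp⟩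
  | cons u us ih =>
    have hcons : pvGrow (u :: us) good stack
        = if PySem.Set.contains good u = true then pvGrow us good stack
          else pvGrow us (PySem.Set.add good u) (u :: stack) := rfl
    by_cases h : u ∈ good
    · have hc : PySem.Set.contains good u = true := (PySem.Set.contains_iff _ _).mpr h
      obtain ⟨nw, heq, hnd, hmem, hcov⟩ := ih good stack
      refine ⟨nw, ?_, hnd, ?_, ?_⟩
      · rw [hcons, if_pos hc]; exact heq
      · exact fun x hx => ⟨List.mem_cons_of_mem _ (hmem x hx).1, (hmem x hx).2⟩
      · intro x hx
        rcases List.mem_cons.mp hx with rfl | hx'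
        · exact Or.inl h
        · exact hcov x hx'
    · have hc : ¬ PySem.Set.contains good u = true :=
        fun h' => h ((PySem.Set.contains_iff _ _).mp h')
      have hadd : PySem.Set.add good u = good ++ [u] := PySem.Set.add_of_not_mem h
      obtain ⟨nw, heq, hnd, hmem, hcov⟩ := ih (PySem.Set.add good u) (u :: stack)
      refine ⟨u :: nw, ?_, ?_, ?_, ?_⟩
      · rw [hcons, if_neg hc, heq, hadd]
        simp
      · refine List.nodup_cons.mpr ⟨fun hv => ?_, hnd⟩
        exact (hmem u hv).2 (by rw [hadd]; simp)
      · intro x hx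
        rcases List.mem_cons.mp hx with rfl | hx'
        · exact ⟨List.mem_cons_self .., h⟩
        · refine ⟨List.mem_cons_of_mem _ (hmem x hx').1, fun hxv => ?_⟩
          exact (hmem x hx').2 (by rw [hadd]; exact List.mem_append_left _ hxv)
      · intro x hx
        rcases List.mem_cons.mp hx with rfl | hx'
        · exact Or.inr (List.mem_cons_self ..)
        · rcases hcov x hx' with hv | hnw
          · rw [hadd] at hv
            rcases List.mem_append.mp hv with hv | hv
            · exact Or.inl hv
            · simp at hv; subst hv; exact Or.inr (List.mem_cons_self ..)
          · exact Or.inr (List.mem_cons_of_mem _ hnw)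

theorem rev_getD (G : PySem.Dict String (List String)) (hnd : G.keys.Nodup) (u v : String) :
    u ∈ PySem.Dict.getD (pvRevOf G) v [] ↔ EdgeG G u v := by
  unfold pvRevOf
  rw [PySem.Dict.getD_foldl_modify_append]
  rw [PySem.Dict.getD_empty]
  simp only [List.nil_append]
  constructor
  · intro h
    obtain ⟨pr, hpr, hpr2⟩ := List.mem_map.mp h
    obtain ⟨hpre, hpr1⟩ := List.mem_filter.mp hpr
    obtain ⟨⟨k, vs⟩, huv, hmem2⟩ := List.mem_flatMap.mp hpre
    obtain ⟨w, hw, heqp⟩ := List.mem_map.mp hmem2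
    subst heqp
    have hk : k = u := by simpa using hpr2
    have hwv : w = v := by simpa using hpr1
    subst hk
    subst hwv
    unfold EdgeG
    rw [PySem.Dict.getD_of_mem_items G huv hnd []]
    exact hw
  · intro h
    have hk : u ∈ G.keys := pvEdge_mem_keys G u v h
    have hit : (u, PySem.Dict.getD G u []) ∈ G.items := by
      rw [PySem.Dict.items_eq_map_keys G hnd []]
      exact List.mem_map.mpr ⟨u, hk, rfl⟩
    exact List.mem_map.mpr ⟨(v, u),
      List.mem_filter.mpr ⟨List.mem_flatMap.mpr ⟨(u, PySem.Dict.getD G u []), hit,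
        List.mem_map.mpr ⟨v, h, rfl⟩⟩, by simp⟩, rfl⟩

theorem reach_sound (G L rev : PySem.Dict String (List String)) (q : String)
    (hrev : ∀ u v, u ∈ PySem.Dict.getD rev v [] ↔ EdgeG G u v) :
    ∀ fuel (stack : List String) (good : PySem.Set String),
      (∀ x ∈ good, ReachQ G L q x) → (∀ x ∈ stack, x ∈ good) →
      ∀ x ∈ pvReach rev fuel stack good, ReachQ G L q x := by
  intro fuel
  induction fuel with
  | zero => intro stack good hgood _; simpa [pvReach] using hgood
  | succ f ih =>
    intro stack good hgood hsub
    cases stack with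
    | nil => simpa [pvReach] using hgood
    | cons v rest =>
      simp only [pvReach]
      obtain ⟨nw, heq, hnd, hmem, hcov⟩ := pvGrow_spec (PySem.Dict.getD rev v []) good rest
      rw [heq]
      show ∀ x ∈ pvReach rev f (nw.reverse ++ rest) (good ++ nw), ReachQ G L q x
      apply ih
      · intro x hx
        rcases List.mem_append.mp hx with hx | hx
        · exact hgood x hx
        · obtain ⟨t, hpath, hqt⟩ := hgood v (hsub v (List.mem_cons_self ..))
          exact ⟨t, Relation.ReflTransGen.head ((hrev x v).mp (hmem x hx).1) hpath, hqt⟩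
      · intro x hx
        rcases List.mem_append.mp hx with hx | hx
        · exact List.mem_append_right _ (List.mem_reverse.mp hx)
        · exact List.mem_append_left _ (hsub x (List.mem_cons_of_mem _ hx))

theorem reach_complete (G rev : PySem.Dict String (List String))
    (hrev : ∀ u v, u ∈ PySem.Dict.getD rev v [] ↔ EdgeG G u v) :
    ∀ fuel (stack : List String) (good : PySem.Set String),
      stack.Nodup → (∀ x ∈ stack, x ∈ good) → good.Nodup →
      (∀ y ∈ good, y ∉ stack → ∀ u ∈ PySem.Dict.getD rev y [], u ∈ good) →
      fuel ≥ stack.length + ((G.keys.toFinset) \ good.toFinset).card →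
      (∀ x ∈ good, x ∈ pvReach rev fuel stack good) ∧
      (∀ y ∈ pvReach rev fuel stack good, ∀ u ∈ PySem.Dict.getD rev y [],
        u ∈ pvReach rev fuel stack good) := by
  intro fuel
  induction fuel with
  | zero =>
    intro stack good hsnd hsub hgnd hcl hfuel
    have hst : stack = [] := by
      cases stack with
      | nil => rfl
      | cons a l => simp [List.length_cons] at hfuel
    subst hst
    simp only [pvReach]
    exact ⟨fun x hx => hx, fun y hy u hu => hcl y hy (by simp) u hu⟩
  | succ f ih =>
    intro stack good hsnd hsub hgnd hcl hfuel
    cases stack with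
    | nil =>
      simp only [pvReach]
      exact ⟨fun x hx => hx, fun y hy u hu => hcl y hy (by simp) u hu⟩
    | cons v rest =>
      simp only [pvReach]
      obtain ⟨nw, heq, hndw, hmem, hcov⟩ := pvGrow_spec (PySem.Dict.getD rev v []) good rest
      rw [heq]
      show (∀ x ∈ good, x ∈ pvReach rev f (nw.reverse ++ rest) (good ++ nw)) ∧ _
      have hrest : ∀ x ∈ rest, x ∈ good := fun x hx => hsub x (List.mem_cons_of_mem _ hx)
      have hnwK : ∀ x ∈ nw, x ∈ G.keys := fun x hx =>
        pvEdge_mem_keys G x v ((hrev x v).mp (hmem x hx).1)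
      have hcs := pvCard_step G.keys good nw hndw hnwK (fun x hx => (hmem x hx).2)
      have hih := ih (nw.reverse ++ rest) (good ++ nw)
        (by
          refine List.Nodup.append (List.nodup_reverse.mpr hndw) (List.Nodup.of_cons hsnd) ?_
          intro x hx hr
          exact (hmem x (List.mem_reverse.mp hx)).2 (hrest x hr))
        (by
          intro x hx
          rcases List.mem_append.mp hx with hx | hx
          · exact List.mem_append_right _ (List.mem_reverse.mp hx)
          · exact List.mem_append_left _ (hrest x hx))
        (by
          refine List.Nodup.append hgnd hndw ?_
          intro x hx hn
          exact (hmem x hn).2 hx)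
        (by
          intro y hy hny u hu
          rcases List.mem_append.mp hy with hy | hy
          · by_cases hyv : y = v
            · subst hyv
              rcases hcov u hu with h' | h'
              · exact List.mem_append_left _ h'
              · exact List.mem_append_right _ h'
            · have hns : y ∉ v :: rest := by
                intro hm
                rcases List.mem_cons.mp hm with rfl | hm'
                · exact hyv rfl
                · exact hny (List.mem_append_right _ hm')
              exact List.mem_append_left _ (hcl y hy hns u hu)
          · exact absurd (List.mem_append_left rest (List.mem_reverse.mpr hy)) hny)
        (by
          have := hcs.1
          simp only [List.length_append, List.length_cons, List.length_reverse] at hfuel ⊢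
          omega)
      exact ⟨fun x hx => hih.1 x (List.mem_append_left _ hx), hih.2⟩

theorem pvBoolExt (a b : Bool) (h : a = true ↔ b = true) : a = b := by
  cases a <;> cases b <;> simp_all

theorem main_eq (G L : PySem.Dict String (List String))
    (hndG : G.keys.Nodup) (hndL : L.keys.Nodup) (p q : String) :
    pvOuterA G L p q G.keys =
      (G.keys.all fun n => !(PySem.Dict.getD L n []).contains p ||
        PySem.Set.contains (pvReach (pvRevOf G) (G.size + L.size) (pvStack0 L q)
          (PySem.Set.ofList (pvStack0 L q))) n) := by
  have hrev := rev_getD G hndG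
  have hstq : ∀ x, x ∈ pvStack0 L q ↔ q ∈ PySem.Dict.getD L x [] := by
    intro x
    constructor
    · intro hx
      have := List.mem_filter.mp hx
      simpa using this.2
    · intro hqx
      exact List.mem_filter.mpr ⟨pvEdge_mem_keys L x q hqx, by simpa using hqx⟩
  have hnds0 : (pvStack0 L q).Nodup := hndL.filter _
  have hsound : ∀ x ∈ pvReach (pvRevOf G) (G.size + L.size) (pvStack0 L q)
      (PySem.Set.ofList (pvStack0 L q)), ReachQ G L q x :=
    reach_sound G L (pvRevOf G) q hrev _ _ _
      (fun x hx => ⟨x, Relation.ReflTransGen.refl,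
        (hstq x).mp ((PySem.Set.mem_ofList _ _).mp hx)⟩)
      (fun x hx => (PySem.Set.mem_ofList _ _).mpr hx)
  have hcomp := reach_complete G (pvRevOf G) hrev (G.size + L.size) (pvStack0 L q)
      (PySem.Set.ofList (pvStack0 L q)) hnds0
      (fun x hx => (PySem.Set.mem_ofList _ _).mpr hx)
      (PySem.Set.nodup_ofList _)
      (fun y hy hns => absurd ((PySem.Set.mem_ofList _ _).mp hy) hns)
      (by
        have h1 : (pvStack0 L q).length ≤ L.size := by
          have h1a : (pvStack0 L q).length ≤ L.keys.length := List.length_filter_le _ _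
          have h1b : L.keys.length = L.size := by
            show (L.items.map Prod.fst).length = L.items.length
            simp
          omega
        have h2 : (G.keys.toFinset \ (PySem.Set.ofList (pvStack0 L q)).toFinset).card
            ≤ G.size := by
          have h2a := Finset.card_le_card
            (Finset.sdiff_subset (s := G.keys.toFinset)
              (t := (PySem.Set.ofList (pvStack0 L q)).toFinset))
          have h2b := List.toFinset_card_le G.keys
          have h2c : G.keys.length = G.size := by
            show (G.items.map Prod.fst).length = G.items.length
            simp
          omega
        omega)
  have hR_iff : ∀ x, x ∈ pvReach (pvRevOf G) (G.size + L.size) (pvStack0 L q)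
      (PySem.Set.ofList (pvStack0 L q)) ↔ ReachQ G L q x := by
    intro x
    constructor
    · exact hsound x
    · rintro ⟨t, hpath, hqt⟩
      have hbase := hcomp.1 t ((PySem.Set.mem_ofList _ _).mpr ((hstq t).mpr hqt))
      clear hqt
      induction hpath using Relation.ReflTransGen.head_induction_on with
      | refl => exact hbase
      | head hxy hyb ih => exact hcomp.2 _ ih _ ((hrev _ _).mpr hxy)
  apply pvBoolExt
  rw [outerA_spec G L hndG p q G.keys, List.all_eq_true]
  constructor
  · intro h n hn
    by_cases hp : (PySem.Dict.getD L n []).contains p = true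
    · rw [hp, Bool.not_true, Bool.false_or]
      exact (PySem.Set.contains_iff _ _).mpr ((hR_iff n).mpr (h n hn hp))
    · rw [Bool.eq_false_iff.mpr hp, Bool.not_false, Bool.true_or]
  · intro h n hn hp
    have := h n hn
    rw [hp] at this
    simp only [Bool.not_true, Bool.false_or] at this
    exact (hR_iff n).mp ((PySem.Set.contains_iff _ _).mp this)

-- ===== VERDICT (by name: the statement is the Claim_ definition above) =====
theorem check_G_implies_F_spec : Claim_equal_check_G_implies_F := by
  unfold Claim_equal_check_G_implies_F
  intro graph label p q _
  unfold Spec_check_G_implies_F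
  show check_G_implies_F graph label p q = check_G_implies_F_alt graph label p q
  unfold check_G_implies_F check_G_implies_F_alt
  exact main_eq (PySem.Dict.ofList graph) (PySem.Dict.ofList label)
    (PySem.Dict.nodup_keys_ofList graph) (PySem.Dict.nodup_keys_ofList label) p q
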